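-- pv_equiv track=rewrite | github.com/VynoDePal/Collegue | collegue/tools/refactoring.py | _analyze_code_metrics
-- ===== SOURCE A (Python) =====
-- from typing import Optional, Dict, Any, List, Union, Type
--
-- def _analyze_code_metrics(code: str, language: str) -> Dict[str, Any]:
--     lines = code.split('\n')
--     non_empty_lines = [line for line in lines if line.strip()]
--
--     metrics = {
--         "total_lines": len(lines),
--         "code_lines": len(non_empty_lines),
--         "comment_lines": 0,
--         "function_count": 0,
--         "class_count": 0,
--         "complexity_score": 0
--     }
--
--     comment_patterns = {
--         "python": ["#"],
--         "javascript": ["//", "/*"],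
--         "typescript": ["//", "/*"],
--         "java": ["//", "/*"],
--         "c#": ["//", "/*"],
--         "php": ["//", "/*", "#"]
--     }
--
--     patterns = comment_patterns.get(language.lower(), ["#", "//"])
--     for line in lines:
--         for pattern in patterns:
--             if pattern in line:
--                 metrics["comment_lines"] += 1
--                 break
--
--     if language.lower() == "python":
--         metrics["function_count"] = sum(1 for line in non_empty_lines if line.strip().startswith("def "))
--         metrics["class_count"] = sum(1 for line in non_empty_lines if line.strip().startswith("class "))
--     elif language.lower() == "php":
--         metrics["function_count"] = sum(1 for line in non_empty_lines if "function " in line)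
--         metrics["class_count"] = sum(1 for line in non_empty_lines if line.strip().startswith("class ") or line.strip().startswith("abstract class ") or line.strip().startswith("trait "))
--     else:
--         metrics["function_count"] = sum(1 for line in non_empty_lines if "function " in line.lower())
--         metrics["class_count"] = sum(1 for line in non_empty_lines if "class " in line.lower())
--
--
--     complexity_indicators = ["if ", "for ", "while ", "switch ", "case ", "try ", "catch ", "except "]
--     for line in non_empty_lines:
--         for indicator in complexity_indicators:
--             if indicator in line.lower():
--                 metrics["complexity_score"] += 1
--
--     return metrics
-- ===== SOURCE B (Python) =====
-- # Single fused pass over the lines (A makes several passes over the line list).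
-- COMMENT_PATTERNS = {
--     "python": ["#"],
--     "javascript": ["//", "/*"],
--     "typescript": ["//", "/*"],
--     "java": ["//", "/*"],
--     "c#": ["//", "/*"],
--     "php": ["//", "/*", "#"],
-- }
--
-- COMPLEXITY_INDICATORS = ["if ", "for ", "while ", "switch ", "case ", "try ", "catch ", "except "]
--
--
-- def _counts(lang, line, stripped):
--     if lang == "python":
--         return int(stripped.startswith("def ")), int(stripped.startswith("class "))
--     if lang == "php":
--         return int("function " in line), int(
--             stripped.startswith("class ")
--             or stripped.startswith("abstract class ")
--             or stripped.startswith("trait ")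
--         )
--     low = line.lower()
--     return int("function " in low), int("class " in low)
--
--
-- def _analyze_code_metrics(code, language):
--     lang = language.lower()
--     patterns = COMMENT_PATTERNS.get(lang, ["#", "//"])
--     total = code_cnt = comments = funcs = classes = complexity = 0
--     for line in code.split('\n'):
--         total += 1
--         if any(p in line for p in patterns):
--             comments += 1
--         stripped = line.strip()
--         if stripped:
--             code_cnt += 1
--             f, c = _counts(lang, line, stripped)
--             funcs += f
--             classes += c
--             low = line.lower()
--             complexity += sum(1 for ind in COMPLEXITY_INDICATORS if ind in low)
--     return {
--         "total_lines": total,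
--         "code_lines": code_cnt,
--         "comment_lines": comments,
--         "function_count": funcs,
--         "class_count": classes,
--         "complexity_score": complexity,
--     }
-- ===== Notes on version B (the rewrite author's own statement) =====
-- stated objective: alternative
-- what changed: A builds an intermediate non-empty-lines list and makes four separate passes (comment loop, two sum-generators, complexity loop); B is one fused fold over the split lines carrying six counters, dispatching per line.
import Mathlib
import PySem

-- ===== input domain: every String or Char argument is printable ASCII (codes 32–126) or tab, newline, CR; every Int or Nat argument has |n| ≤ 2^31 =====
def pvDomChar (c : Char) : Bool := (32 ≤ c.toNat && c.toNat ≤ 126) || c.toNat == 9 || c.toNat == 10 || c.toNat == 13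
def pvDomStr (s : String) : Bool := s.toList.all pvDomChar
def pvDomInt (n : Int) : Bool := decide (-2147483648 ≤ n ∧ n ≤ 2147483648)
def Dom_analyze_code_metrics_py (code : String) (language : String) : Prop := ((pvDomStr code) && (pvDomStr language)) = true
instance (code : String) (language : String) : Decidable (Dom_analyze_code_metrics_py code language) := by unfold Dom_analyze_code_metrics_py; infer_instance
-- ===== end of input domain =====

-- B replaces A's intermediate list and four separate counting passes by one fused fold over the lines; return value only, no side effects.

-- shared literal data (the comment-pattern dict and the complexity-indicator list of the Python source)
def cmCommentPatterns : PySem.Dict (List Char) (List (List Char)) :=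
  PySem.Dict.mk [("python".toList, ["#".toList]),
                 ("javascript".toList, ["//".toList, "/*".toList]),
                 ("typescript".toList, ["//".toList, "/*".toList]),
                 ("java".toList, ["//".toList, "/*".toList]),
                 ("c#".toList, ["//".toList, "/*".toList]),
                 ("php".toList, ["//".toList, "/*".toList, "#".toList])]

def cmIndicators : List (List Char) :=
  ["if ".toList, "for ".toList, "while ".toList, "switch ".toList,
   "case ".toList, "try ".toList, "catch ".toList, "except ".toList]

-- ===== PORT A =====
def analyze_code_metrics_py (code : String) (language : String) : List (String × Int) :=
  let lines := PySem.Chars.splitOn code.toList "\n".toList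
  let non_empty_lines := lines.filter (fun line => !(PySem.Chars.strip line).isEmpty)
  let total_lines : Int := lines.length
  let code_lines : Int := non_empty_lines.length
  let patterns := cmCommentPatterns.getD (PySem.Chars.lower language.toList) ["#".toList, "//".toList]
  -- 'for pattern in patterns: if pattern in line: +=1; break' — one increment on the first matching pattern
  let comment_lines : Int := lines.foldl
    (fun acc line => if patterns.any (fun p => PySem.Chars.isIn p line) then acc + 1 else acc) 0
  let function_count : Int :=
    if PySem.Chars.lower language.toList = "python".toList then
      (non_empty_lines.map (fun line =>
        if PySem.Chars.startswith (PySem.Chars.strip line) "def ".toList then (1 : Int) else 0)).sum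
    else if PySem.Chars.lower language.toList = "php".toList then
      (non_empty_lines.map (fun line =>
        if PySem.Chars.isIn "function ".toList line then (1 : Int) else 0)).sum
    else
      (non_empty_lines.map (fun line =>
        if PySem.Chars.isIn "function ".toList (PySem.Chars.lower line) then (1 : Int) else 0)).sum
  let class_count : Int :=
    if PySem.Chars.lower language.toList = "python".toList then
      (non_empty_lines.map (fun line =>
        if PySem.Chars.startswith (PySem.Chars.strip line) "class ".toList then (1 : Int) else 0)).sum
    else if PySem.Chars.lower language.toList = "php".toList then
      (non_empty_lines.map (fun line =>
        if PySem.Chars.startswith (PySem.Chars.strip line) "class ".toList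
           || PySem.Chars.startswith (PySem.Chars.strip line) "abstract class ".toList
           || PySem.Chars.startswith (PySem.Chars.strip line) "trait ".toList then (1 : Int) else 0)).sum
    else
      (non_empty_lines.map (fun line =>
        if PySem.Chars.isIn "class ".toList (PySem.Chars.lower line) then (1 : Int) else 0)).sum
  -- inner loop has no break: one increment per matching indicator
  let complexity_score : Int := non_empty_lines.foldl
    (fun acc line => cmIndicators.foldl
      (fun a ind => if PySem.Chars.isIn ind (PySem.Chars.lower line) then a + 1 else a) acc) 0
  [("total_lines", total_lines), ("code_lines", code_lines), ("comment_lines", comment_lines),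
   ("function_count", function_count), ("class_count", class_count), ("complexity_score", complexity_score)]

-- ===== PORT B =====
def cmCounts (lang line stripped : List Char) : Int × Int :=
  if lang = "python".toList then
    ((if PySem.Chars.startswith stripped "def ".toList then 1 else 0),
     (if PySem.Chars.startswith stripped "class ".toList then 1 else 0))
  else if lang = "php".toList then
    ((if PySem.Chars.isIn "function ".toList line then 1 else 0),
     (if PySem.Chars.startswith stripped "class ".toList
         || PySem.Chars.startswith stripped "abstract class ".toList
         || PySem.Chars.startswith stripped "trait ".toList then 1 else 0))
  else
    let low := PySem.Chars.lower line
    ((if PySem.Chars.isIn "function ".toList low then 1 else 0),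
     (if PySem.Chars.isIn "class ".toList low then 1 else 0))

def cmStep (lang : List Char) (patterns : List (List Char))
    (st : Int × Int × Int × Int × Int × Int) (line : List Char) :
    Int × Int × Int × Int × Int × Int :=
  let (t, cd, cm, f, cl, cx) := st
  let cm' := if patterns.any (fun p => PySem.Chars.isIn p line) then cm + 1 else cm
  let stripped := PySem.Chars.strip line
  if stripped.isEmpty then (t + 1, cd, cm', f, cl, cx)
  else
    let fc := cmCounts lang line stripped
    let low := PySem.Chars.lower line
    (t + 1, cd + 1, cm', f + fc.1, cl + fc.2,
     cx + ((cmIndicators.countP (fun ind => PySem.Chars.isIn ind low) : Nat) : Int))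

def analyze_code_metrics_py_alt (code : String) (language : String) : List (String × Int) :=
  let lang := PySem.Chars.lower language.toList
  let patterns := cmCommentPatterns.getD lang ["#".toList, "//".toList]
  let st := (PySem.Chars.splitOn code.toList "\n".toList).foldl (cmStep lang patterns) (0, 0, 0, 0, 0, 0)
  [("total_lines", st.1), ("code_lines", st.2.1), ("comment_lines", st.2.2.1),
   ("function_count", st.2.2.2.1), ("class_count", st.2.2.2.2.1), ("complexity_score", st.2.2.2.2.2)]

-- ===== PRECONDITION & SPEC =====
def Spec_analyze_code_metrics_py (code : String) (language : String) (out : List (String × Int)) : Prop := out = analyze_code_metrics_py_alt code language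
instance (code : String) (language : String) (out : List (String × Int)) : Decidable (Spec_analyze_code_metrics_py code language out) := by unfold Spec_analyze_code_metrics_py; infer_instance

-- ===== CLAIM (what is proved, stated in full; the proofs are below) =====
def Claim_equal_analyze_code_metrics_py : Prop := ∀ (code : String) (language : String), Dom_analyze_code_metrics_py code language → Spec_analyze_code_metrics_py code language (analyze_code_metrics_py code language)

-- ===== LEMMAS AND PROOFS =====

theorem cm_count_fold (p : List Char → Bool) :
    ∀ (l : List (List Char)) (n : Int),
      l.foldl (fun acc line => if p line then acc + 1 else acc) n = n + (l.countP p : Nat) := by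
  intro l
  induction l with
  | nil => intro n; simp
  | cons x xs ih =>
      intro n
      simp only [List.foldl_cons, List.countP_cons, ih]
      by_cases h : p x <;> simp [h] <;> try omega

theorem cm_fuse (lang : List Char) (patterns : List (List Char)) :
    ∀ (l : List (List Char)) (st : Int × Int × Int × Int × Int × Int),
      l.foldl (cmStep lang patterns) st =
        (st.1 + l.length,
         st.2.1 + ((l.filter (fun line => !(PySem.Chars.strip line).isEmpty)).length : Int),
         st.2.2.1 + ((l.countP (fun line => patterns.any (fun p => PySem.Chars.isIn p line)) : Nat) : Int),
         st.2.2.2.1 + ((l.filter (fun line => !(PySem.Chars.strip line).isEmpty)).map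
           (fun line => (cmCounts lang line (PySem.Chars.strip line)).1)).sum,
         st.2.2.2.2.1 + ((l.filter (fun line => !(PySem.Chars.strip line).isEmpty)).map
           (fun line => (cmCounts lang line (PySem.Chars.strip line)).2)).sum,
         st.2.2.2.2.2 + ((l.filter (fun line => !(PySem.Chars.strip line).isEmpty)).map
           (fun line => ((cmIndicators.countP (fun ind => PySem.Chars.isIn ind (PySem.Chars.lower line)) : Nat) : Int))).sum) := by
  intro l
  induction l with
  | nil => intro st; simp
  | cons x xs ih =>
      intro st
      obtain ⟨t, cd, cm, f, cl, cx⟩ := st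
      simp only [List.foldl_cons, ih, cmStep, List.countP_cons, List.filter_cons, List.length_cons]
      by_cases hs : (PySem.Chars.strip x).isEmpty <;>
        by_cases hp : patterns.any (fun p => PySem.Chars.isIn p x) <;>
          simp [hs, hp] <;> (repeat' apply And.intro) <;> push_cast <;> ring

-- ===== VERDICT (by name: the statement is the Claim_ definition above) =====
theorem analyze_code_metrics_py_spec : Claim_equal_analyze_code_metrics_py := by
  intro code language _
  unfold Spec_analyze_code_metrics_py analyze_code_metrics_py analyze_code_metrics_py_alt
  simp only [cm_fuse, cm_count_fold, PySem.List.foldl_add]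
  set lang := PySem.Chars.lower language.toList with hlang
  set lines := PySem.Chars.splitOn code.toList "\n".toList with hlines
  by_cases h1 : lang = ['p','y','t','h','o','n']
  · simp [h1, cmCounts, zero_add]
  · by_cases h2 : lang = ['p','h','p']
    · simp [h2, cmCounts, zero_add]
    · simp [h1, h2, cmCounts, zero_add]
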